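-- pv_equiv track=rewrite | github.com/aknob/AfpMaster | AfpBase/AfpUtilities/AfpStringUtilities.py | Afp_maskedText
-- ===== SOURCE A (Python) =====
-- def Afp_maskedText(string):
--     masked = []
--     unmasked = []
--     split = string.split("\"")
--     mask = False
--     for part in split:
--         if mask: masked.append(part)
--         else: unmasked.append(part)
--         mask = not mask
--     return unmasked, masked
-- ===== SOURCE B (Python) =====
-- def Afp_maskedText(string):
--     def pair(ps):
--         if not ps:
--             return [], []
--         if len(ps) == 1:
--             return [ps[0]], []
--         u, m = pair(ps[2:])
--         return [ps[0]] + u, [ps[1]] + m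
--     return pair(string.split('"'))
-- ===== Notes on version B (the rewrite author's own statement) =====
-- stated objective: alternative
-- what changed: Replaces the boolean-toggle accumulation loop by a recursive helper that consumes the split list two parts at a time, building both result lists by cons with no mask state.
import Mathlib
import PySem

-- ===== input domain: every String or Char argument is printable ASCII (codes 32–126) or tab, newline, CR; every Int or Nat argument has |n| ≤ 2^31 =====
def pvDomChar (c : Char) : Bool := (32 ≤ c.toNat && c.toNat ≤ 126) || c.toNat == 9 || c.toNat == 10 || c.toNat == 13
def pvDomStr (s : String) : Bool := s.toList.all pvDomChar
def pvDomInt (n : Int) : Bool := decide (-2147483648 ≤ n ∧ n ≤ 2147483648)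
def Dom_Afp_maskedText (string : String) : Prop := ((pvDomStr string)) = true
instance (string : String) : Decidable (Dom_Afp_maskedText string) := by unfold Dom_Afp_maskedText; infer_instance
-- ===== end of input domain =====

-- B replaces A's boolean-toggle accumulation loop by a recursive helper consuming the
-- split list two parts at a time (objective: alternative decomposition, same cost).

-- ===== PORT A =====
-- A's loop state: (masked, unmasked, mask) exactly as in the Python, appending at the back.
def pvStepA (st : List String × List String × Bool) (part : String) :
    List String × List String × Bool :=
  match st with
  | (masked, unmasked, mask) =>
    if mask then (masked ++ [part], unmasked, !mask)
    else (masked, unmasked ++ [part], !mask)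

def Afp_maskedText (string : String) : List String × List String :=
  let split := (PySem.Str.split? string "\"").getD []   -- sep ≠ "" never raises
  match split.foldl pvStepA ([], [], false) with
  | (masked, unmasked, _) => (unmasked, masked)

-- ===== PORT B =====
-- Source B's pair helper: consumes two parts at a time, no mask state.
def pvPair : List String → List String × List String
  | [] => ([], [])
  | [p] => ([p], [])
  | p :: q :: rest =>
    match pvPair rest with
    | (u, m) => (p :: u, q :: m)

def Afp_maskedText_alt (string : String) : List String × List String :=
  pvPair ((PySem.Str.split? string "\"").getD [])

-- ===== PRECONDITION & SPEC =====
def Spec_Afp_maskedText (string : String) (out : List String × List String) : Prop := out = Afp_maskedText_alt string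
instance (string : String) (out : List String × List String) : Decidable (Spec_Afp_maskedText string out) := by unfold Spec_Afp_maskedText; infer_instance

-- ===== CLAIM (what is proved, stated in full; the proofs are below) =====
def Claim_equal_Afp_maskedText : Prop := ∀ (string : String), Dom_Afp_maskedText string → Spec_Afp_maskedText string (Afp_maskedText string)

-- ===== LEMMAS AND PROOFS =====

-- A's fold from an unmasked state equals B's pair recursion, appended to the accumulators.
theorem pvFold_eq_pair (ps : List String) (masked unmasked : List String) :
    ps.foldl pvStepA (masked, unmasked, false)
      = (masked ++ (pvPair ps).2, unmasked ++ (pvPair ps).1, decide (ps.length % 2 = 1)) := by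
  induction ps using pvPair.induct generalizing masked unmasked with
  | case1 => simp [pvPair]
  | case2 p => simp [pvPair, pvStepA]
  | case3 p q rest u m hpm ih =>
    have h1 : pvStepA (masked, unmasked, false) p = (masked, unmasked ++ [p], true) := by
      simp [pvStepA]
    have h2 : pvStepA (masked, unmasked ++ [p], true) q = (masked ++ [q], unmasked ++ [p], false) := by
      simp [pvStepA]
    rw [List.foldl_cons, List.foldl_cons, h1, h2, ih]
    have hp : pvPair (p :: q :: rest) = (p :: u, q :: m) := by simp [pvPair, hpm]
    have hl : decide (rest.length % 2 = 1) = decide ((p :: q :: rest).length % 2 = 1) := by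
      simp only [List.length_cons]
      congr 1
      exact propext ⟨fun h => by omega, fun h => by omega⟩
    simp [hp, hpm, hl]

-- ===== VERDICT (by name: the statement is the Claim_ definition above) =====
theorem Afp_maskedText_spec : Claim_equal_Afp_maskedText := by
  intro s _
  show _ = _
  unfold Afp_maskedText Afp_maskedText_alt
  simp only [pvFold_eq_pair]
  simp
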